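-- pv_equiv track=rewrite | github.com/duke3232/Kismet | kismet/Kismet.py | process_nesting
-- ===== SOURCE A (Python) =====
-- def process_nesting(text,count=0):
--     start = -1
--     inside = 0
--     output = []
--     for index,c in enumerate(text):
--         if c == '[':
--             if inside == 0:
--                 count += 1
--                 start = index
--             inside += 1
--         elif c == ']':
--             inside -= 1
--             if inside == 0:
--                 rules,new_count = process_nesting(text[start+1:index],count)
--
--                 output.append( (count,text[start:index+1]))
--                 output += rules
--                 count = new_count
--     return output,count
-- ===== SOURCE B (Python) =====
-- def first_group(seg):
--     # first complete bracket group at the top level of seg: (start, end) indices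
--     inside = 0
--     start = 0
--     for i, c in enumerate(seg):
--         if c == '[':
--             if inside == 0:
--                 start = i
--             inside += 1
--         elif c == ']':
--             inside -= 1
--             if inside == 0:
--                 return (start, i)
--     return None
--
--
-- def process_nesting(text, count=0):
--     # Depth-first worklist of segments instead of recursion on substrings:
--     # number each group when it is reached, then visit its interior before
--     # the rest of the segment (pre-order).
--     output = []
--     todo = [text]
--     while todo:
--         seg = todo.pop()
--         span = first_group(seg)
--         if span is None:
--             continue
--         s, e = span
--         count += 1
--         output.append((count, seg[s:e + 1]))
--         todo.append(seg[e + 1:])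
--         todo.append(seg[s + 1:e])
--     return output, count
-- ===== Notes on version B (the rewrite author's own statement) =====
-- stated objective: alternative
-- what changed: Replaced the recursion on bracket substrings by an iterative depth-first worklist of segments: a helper finds the first complete top-level group of a segment, which is numbered and split into interior and tail; Pre_ excludes texts with more '[' than ']' (an unclosed group), where A's returned count also counts the unclosed group it never reports while B counts only reported groups -- an unspecified corner on malformed input (the reported group lists agree everywhere).
-- outside the precondition, e.g. on process_nesting('[', 0): A returns ([], 1), B returns ([], 0); on process_nesting('[[a]', 0): A returns ([], 1), B returns ([], 0)
import Mathlib
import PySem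

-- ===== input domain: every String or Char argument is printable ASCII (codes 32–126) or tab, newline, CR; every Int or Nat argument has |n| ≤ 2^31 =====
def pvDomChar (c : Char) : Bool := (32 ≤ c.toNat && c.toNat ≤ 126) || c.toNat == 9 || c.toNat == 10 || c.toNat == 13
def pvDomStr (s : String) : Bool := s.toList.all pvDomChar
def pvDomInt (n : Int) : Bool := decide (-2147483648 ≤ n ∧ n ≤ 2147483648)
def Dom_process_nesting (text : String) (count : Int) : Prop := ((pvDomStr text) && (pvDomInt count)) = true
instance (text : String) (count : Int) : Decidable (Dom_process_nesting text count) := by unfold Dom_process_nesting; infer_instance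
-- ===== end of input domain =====

-- B replaces A's recursion on bracket substrings by an iterative depth-first worklist of
-- segments (find the first complete top-level group, number it, split off interior and tail).

-- ===== PORT A =====
-- A's loop; the recursive call of A on text[start+1:index] appears as the self-call on
-- the slice.  The dite guard only makes the computation total (the slice is always
-- strictly shorter when the branch is reached); it is not a change of algorithm.
def pnLoopA (text : List Char) (rest : List (Int × Char)) (start inside : Int)
    (output : List (Int × String)) (count : Int) : List (Int × String) × Int :=
  match rest with
  | [] => (output, count)
  | (index, c) :: rest' =>
    if c = '[' then
      if inside = 0 then pnLoopA text rest' index (inside + 1) output (count + 1)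
      else pnLoopA text rest' start (inside + 1) output count
    else if c = ']' then
      if inside - 1 = 0 then
        let inner := PySem.List.slice text (some (start + 1)) (some index)
        if h : inner.length < text.length then
          let r := pnLoopA inner (PySem.List.enumerate inner 0) (-1) 0 [] count
          pnLoopA text rest' start (inside - 1)
            (output ++ (count, String.ofList (PySem.List.slice text (some start) (some (index + 1)))) :: r.1) r.2
        else (output, count)
      else pnLoopA text rest' start (inside - 1) output count
    else pnLoopA text rest' start inside output count
termination_by (text.length, rest.length)
decreasing_by
  · exact Prod.Lex.right _ (by simp)
  · exact Prod.Lex.right _ (by simp)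
  · exact Prod.Lex.left _ _ h
  · exact Prod.Lex.right _ (by simp)
  · exact Prod.Lex.right _ (by simp)
  · exact Prod.Lex.right _ (by simp)

def process_nesting (text : String) (count : Int) : (List (Int × String)) × Int :=
  pnLoopA text.toList (PySem.List.enumerate text.toList 0) (-1) 0 [] count

-- ===== PORT B =====
-- first_group's scan: the first complete top-level bracket group of the segment
def fgLoop (rest : List (Int × Char)) (inside start : Int) : Option (Int × Int) :=
  match rest with
  | [] => none
  | (i, c) :: rest' =>
    if c = '[' then
      if inside = 0 then fgLoop rest' (inside + 1) i
      else fgLoop rest' (inside + 1) start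
    else if c = ']' then
      if inside - 1 = 0 then some (start, i)
      else fgLoop rest' (inside - 1) start
    else fgLoop rest' inside start

def firstGroup (seg : List Char) : Option (Int × Int) :=
  fgLoop (PySem.List.enumerate seg 0) 0 0

-- B's worklist loop; the dite guard only makes the recursion total (when a group is
-- found, interior and tail are together strictly shorter than the segment).
def pnWork (todo : List (List Char)) (output : List (Int × String)) (count : Int) :
    (List (Int × String)) × Int :=
  match todo with
  | [] => (output, count)
  | seg :: rest =>
    match firstGroup seg with
    | none => pnWork rest output count
    | some se =>
      if h : (PySem.List.slice seg (some (se.1 + 1)) (some se.2)).length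
          + (PySem.List.slice seg (some (se.2 + 1)) none).length + 1 < seg.length then
        pnWork (PySem.List.slice seg (some (se.1 + 1)) (some se.2)
            :: PySem.List.slice seg (some (se.2 + 1)) none :: rest)
          (output ++ [(count + 1, String.ofList (PySem.List.slice seg (some se.1) (some (se.2 + 1))))])
          (count + 1)
      else (output, count)
termination_by (todo.map (fun s => s.length + 1)).sum
decreasing_by
  · simp only [List.map_cons, List.sum_cons]; omega
  · simp only [List.map_cons, List.sum_cons]; omega

def process_nesting_alt (text : String) (count : Int) : (List (Int × String)) × Int :=
  pnWork [text.toList] [] count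

-- ===== PRECONDITION & SPEC =====
-- Pre_ excludes texts with more '[' than ']' (i.e. containing an unclosed group): there A's
-- returned count also counts the one unclosed group it never reports, while B counts only
-- the groups it reports — both counts are defensible on such malformed input (the reported
-- group lists agree on every input; only the returned counter differs, always by exactly 1).
def Pre_process_nesting (text : String) (count : Int) : Prop :=
  text.toList.count '[' ≤ text.toList.count ']'
instance (text : String) (count : Int) : Decidable (Pre_process_nesting text count) := by
  unfold Pre_process_nesting; infer_instance

def pvWitness_process_nesting : String × Int := ("[a][b]", 0)

def Spec_process_nesting (text : String) (count : Int) (out : (List (Int × String)) × Int) : Prop := out = process_nesting_alt text count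
instance (text : String) (count : Int) (out : (List (Int × String)) × Int) : Decidable (Spec_process_nesting text count out) := by unfold Spec_process_nesting; infer_instance

-- ===== CLAIM (what is proved, stated in full; the proofs are below) =====
def Claim_equal_process_nesting : Prop := ∀ (text : String) (count : Int), Dom_process_nesting text count → Pre_process_nesting text count → Spec_process_nesting text count (process_nesting text count)

-- ===== LEMMAS AND PROOFS =====

-- net bracket depth of a character / of a string
def cnet (c : Char) : Int := if c = '[' then 1 else if c = ']' then -1 else 0
def net (u : List Char) : Int := (u.map cnet).sum

theorem net_nil : net [] = 0 := rfl
theorem net_cons (c : Char) (u : List Char) : net (c :: u) = cnet c + net u := by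
  simp [net]
theorem net_append (a b : List Char) : net (a ++ b) = net a + net b := by
  simp [net]

theorem cnet_open : cnet '[' = 1 := by decide
theorem cnet_close : cnet ']' = -1 := by decide
theorem cnet_of_ne_close {c : Char} (h : c ≠ ']') : 0 ≤ cnet c := by
  unfold cnet; split_ifs <;> simp_all
theorem cnet_of_ne {c : Char} (h1 : c ≠ '[') (h2 : c ≠ ']') : cnet c = 0 := by
  unfold cnet; split_ifs <;> simp_all

theorem prefix_nonneg {u : List Char} (h : ∀ p q, u = p ++ ']' :: q → 1 ≤ net p) :
    ∀ p q, u = p ++ q → 0 ≤ net p := by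
  intro p
  induction p using List.reverseRecOn with
  | nil => intro q _; simp [net]
  | append_singleton p' c ih =>
    intro q hu
    rw [List.append_assoc] at hu
    have h0 : 0 ≤ net p' := ih _ hu
    rw [net_append, net_cons, net_nil]
    by_cases hc : c = ']'
    · subst hc
      have := h p' q (by simpa using hu)
      rw [cnet_close]; omega
    · have := cnet_of_ne_close hc; omega

-- find the matching close of an already-open bracket
def fc : List Char → Int → Option (List Char × List Char)
  | [], _ => none
  | c :: cs, d =>
    if c = ']' ∧ d = 0 then some ([], cs)
    else (fc cs (d + cnet c)).map (fun wv => (c :: wv.1, wv.2))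

theorem cnet_step {c : Char} {d : Int} (hd : 0 ≤ d) (h1 : ¬(c = ']' ∧ d = 0)) :
    0 ≤ d + cnet c := by
  by_cases hc : c = ']'
  · have : d ≠ 0 := fun h0 => h1 ⟨hc, h0⟩
    rw [hc, cnet_close]; omega
  · have := cnet_of_ne_close hc; omega

theorem fc_sound : ∀ (v : List Char) (d : Int) (w u : List Char), 0 ≤ d →
    fc v d = some (w, u) →
    v = w ++ ']' :: u ∧ d + net w = 0 ∧ (∀ p q, w = p ++ ']' :: q → 1 ≤ d + net p) := by
  intro v
  induction v with
  | nil => intro d w u _ h; simp [fc] at h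
  | cons c cs ih =>
    intro d w u hd h
    rw [fc] at h
    split_ifs at h with h1
    · rw [Option.some.injEq, Prod.mk.injEq] at h
      obtain ⟨hw, hu⟩ := h
      subst hw hu
      obtain ⟨hc, hd0⟩ := h1
      subst hc hd0
      refine ⟨rfl, by rw [net_nil]; omega, ?_⟩
      intro p q hp
      exact absurd hp (by simp)
    · rw [Option.map_eq_some_iff] at h
      obtain ⟨⟨w1, u1⟩, hfc, heq⟩ := h
      rw [Prod.mk.injEq] at heq
      obtain ⟨hw, hu⟩ := heq
      subst hw hu
      obtain ⟨he, hnet, hsplit⟩ := ih (d + cnet c) w1 u1 (cnet_step hd h1) hfc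
      refine ⟨by simp [he], by rw [net_cons]; dsimp only at hnet ⊢; omega, ?_⟩
      intro p q hp
      cases p with
      | nil =>
        rw [List.nil_append] at hp
        have hc : c = ']' := (List.cons.injEq _ _ _ _ ▸ hp).1
        have : d ≠ 0 := fun h0 => h1 ⟨hc, h0⟩
        rw [net_nil]; omega
      | cons c0 p' =>
        rw [List.cons_append, List.cons.injEq] at hp
        obtain ⟨hc0, hp'⟩ := hp
        subst hc0
        have := hsplit p' q hp'
        rw [net_cons]; omega

-- slicing out the middle piece of an appended list
theorem sliceMid (p m s : List Char) (a b : Int)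
    (ha : a = (p.length : Int)) (hb : b = (p.length : Int) + (m.length : Int)) :
    PySem.List.slice (p ++ m ++ s) (some a) (some b) = m := by
  subst ha hb
  rw [PySem.List.slice_natCast_add]
  rw [List.append_assoc, List.drop_left, List.take_left]

-- A's loop only tracks the depth while strictly inside a group
theorem skipA (w : List Char) :
    ∀ (m : Int) (text : List Char) (j : Int) (rest : List (Int × Char))
      (start : Int) (out : List (Int × String)) (count : Int),
    (∀ p q, w = p ++ q → 1 ≤ m + net p) →
    (∀ p q, w = p ++ ']' :: q → 2 ≤ m + net p) →
    pnLoopA text (PySem.List.enumerate w j ++ rest) start m out count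
      = pnLoopA text rest start (m + net w) out count := by
  induction w with
  | nil =>
    intro m text j rest start out count _ _
    simp [PySem.List.enumerate_nil, net_nil]
  | cons c w' ih =>
    intro m text j rest start out count h1 h2
    have hm : 1 ≤ m := by simpa [net_nil] using h1 [] (c :: w') rfl
    rw [PySem.List.enumerate_cons, List.cons_append]
    by_cases hc1 : c = '['
    · subst hc1
      simp only [pnLoopA, if_true]
      rw [if_neg (show ¬ m = 0 by omega)]
      rw [ih (m + 1) text (j + 1) rest start out count
        (fun p q hp => by
          have := h1 ('[' :: p) q (by simp [hp])
          rw [net_cons, cnet_open] at this; omega)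
        (fun p q hp => by
          have := h2 ('[' :: p) q (by simp [hp])
          rw [net_cons, cnet_open] at this; omega)]
      have e : m + net ('[' :: w') = m + 1 + net w' := by rw [net_cons, cnet_open]; ring
      rw [e]
    · by_cases hc2 : c = ']'
      · subst hc2
        have hm2 : 2 ≤ m := by simpa [net_nil] using h2 [] w' rfl
        simp only [pnLoopA, if_true]
        rw [if_neg (show ¬ m - 1 = 0 by omega)]
        rw [ih (m - 1) text (j + 1) rest start out count
          (fun p q hp => by
            have := h1 (']' :: p) q (by simp [hp])
            rw [net_cons, cnet_close] at this; omega)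
          (fun p q hp => by
            have := h2 (']' :: p) q (by simp [hp])
            rw [net_cons, cnet_close] at this; omega)]
        have e : m + net (']' :: w') = m - 1 + net w' := by rw [net_cons, cnet_close]; ring
        rw [e, if_neg hc1]
      · simp only [pnLoopA]
        rw [if_neg hc1, if_neg hc2]
        rw [ih m text (j + 1) rest start out count
          (fun p q hp => by
            have := h1 (c :: p) q (by simp [hp])
            rw [net_cons, cnet_of_ne hc1 hc2] at this; omega)
          (fun p q hp => by
            have := h2 (c :: p) q (by simp [hp])
            rw [net_cons, cnet_of_ne hc1 hc2] at this; omega)]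
        have e : m + net (c :: w') = m + net w' := by
          rw [net_cons, cnet_of_ne hc1 hc2]; omega
        rw [e]

-- one-step evaluation lemmas for A's loop
theorem pnLoopA_open0 (text : List Char) (rest : List (Int × Char)) (index start : Int)
    (out : List (Int × String)) (count : Int) :
    pnLoopA text ((index, '[') :: rest) start 0 out count
      = pnLoopA text rest index 1 out (count + 1) := by
  simp [pnLoopA]

theorem pnLoopA_close1 (text : List Char) (rest : List (Int × Char)) (index start : Int)
    (out : List (Int × String)) (count : Int)
    (h : (PySem.List.slice text (some (start + 1)) (some index)).length < text.length) :
    pnLoopA text ((index, ']') :: rest) start 1 out count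
      = pnLoopA text rest start 0
          (out ++ (count, String.ofList (PySem.List.slice text (some start) (some (index + 1)))) ::
            (pnLoopA (PySem.List.slice text (some (start + 1)) (some index))
              (PySem.List.enumerate (PySem.List.slice text (some (start + 1)) (some index)) 0) (-1) 0 [] count).1)
          (pnLoopA (PySem.List.slice text (some (start + 1)) (some index))
            (PySem.List.enumerate (PySem.List.slice text (some (start + 1)) (some index)) 0) (-1) 0 [] count).2 := by
  simp only [pnLoopA]
  rw [if_neg (show ¬((']' : Char) = '[') by decide), if_true,
      if_pos (show (1 : Int) - 1 = 0 by norm_num), dif_pos h]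
  norm_num

-- count of group-opens A performs during an emit-free scan from depth k
def ocount : List Char → Int → Int
  | [], _ => 0
  | c :: cs, k =>
    if c = '[' then (if k = 0 then 1 else 0) + ocount cs (k + 1)
    else if c = ']' then ocount cs (k - 1)
    else ocount cs k

theorem ocount_nonneg : ∀ (u : List Char) (k : Int), 0 ≤ ocount u k := by
  intro u
  induction u with
  | nil => intro k; simp [ocount]
  | cons c cs ih =>
    intro k
    rw [ocount]
    split_ifs <;> (try have := ih (k + 1)) <;> (try have := ih (k - 1)) <;> (try have := ih k) <;> omega

-- fgLoop returning none does not depend on the enumeration offset or the start value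
theorem fg_none_trans : ∀ (u : List Char) (j st j' st' k : Int),
    fgLoop (PySem.List.enumerate u j) k st = none →
    fgLoop (PySem.List.enumerate u j') k st' = none := by
  intro u
  induction u with
  | nil => intro j st j' st' k _; simp [PySem.List.enumerate_nil, fgLoop]
  | cons c cs ih =>
    intro j st j' st' k h
    rw [PySem.List.enumerate_cons] at h ⊢
    rw [fgLoop] at h ⊢
    by_cases hc1 : c = '['
    · rw [if_pos hc1] at h ⊢
      by_cases hk : k = 0
      · rw [if_pos hk] at h ⊢; exact ih _ _ _ _ _ h
      · rw [if_neg hk] at h ⊢; exact ih _ _ _ _ _ h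
    · rw [if_neg hc1] at h ⊢
      by_cases hc2 : c = ']'
      · rw [if_pos hc2] at h ⊢
        by_cases hk : k - 1 = 0
        · rw [if_pos hk] at h; exact absurd h (by simp)
        · rw [if_neg hk] at h ⊢; exact ih _ _ _ _ _ h
      · rw [if_neg hc2] at h ⊢; exact ih _ _ _ _ _ h

-- characterisation of an emit-free scan: what A counts depends only on the final net
theorem fg_none_ocount : ∀ (u : List Char) (j k st : Int),
    fgLoop (PySem.List.enumerate u j) k st = none →
    (1 ≤ k → ocount u k = 0 ∧ 1 ≤ k + net u) ∧
    (k ≤ 0 → ocount u k = if 1 ≤ k + net u then 1 else 0) := by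
  intro u
  induction u with
  | nil =>
    intro j k st _
    constructor
    · intro hk; exact ⟨rfl, by rw [net_nil]; omega⟩
    · intro hk; rw [net_nil, ocount, if_neg (by omega)]
  | cons c cs ih =>
    intro j k st h
    rw [PySem.List.enumerate_cons, fgLoop] at h
    by_cases hc1 : c = '['
    · subst hc1
      rw [if_pos rfl] at h
      by_cases hk : k = 0
      · subst hk
        rw [if_pos rfl] at h
        obtain ⟨h1, _⟩ := ih (j + 1) 1 j h
        obtain ⟨ho, hn⟩ := h1 le_rfl
        constructor
        · intro hk1; omega
        · intro _
          rw [ocount, if_pos rfl, if_pos rfl, net_cons, cnet_open,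
              if_pos (by omega), show (0 : Int) + 1 = 1 by ring, ho]
          omega
      · rw [if_neg hk] at h
        obtain ⟨h1, h2⟩ := ih (j + 1) (k + 1) st h
        constructor
        · intro hk1
          obtain ⟨ho, hn⟩ := h1 (by omega)
          rw [ocount, if_pos rfl, if_neg hk, ho, net_cons, cnet_open]
          exact ⟨by omega, by omega⟩
        · intro hk0
          have hk0' : k + 1 ≤ 0 := by omega
          have := h2 hk0'
          rw [ocount, if_pos rfl, if_neg hk, this, net_cons, cnet_open]
          have e : 1 ≤ k + 1 + net cs ↔ 1 ≤ k + (1 + net cs) := by omega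
          rw [if_congr e rfl rfl]
          omega
    · by_cases hc2 : c = ']'
      · subst hc2
        rw [if_neg (by decide), if_pos rfl] at h
        have hk1 : ¬ k - 1 = 0 := by
          intro h0; rw [if_pos h0] at h; exact absurd h (by simp)
        rw [if_neg hk1] at h
        obtain ⟨h1, h2⟩ := ih (j + 1) (k - 1) st h
        constructor
        · intro hk2
          obtain ⟨ho, hn⟩ := h1 (by omega)
          rw [ocount, if_neg hc1, if_pos rfl, ho, net_cons, cnet_close]
          exact ⟨rfl, by omega⟩
        · intro hk0
          have := h2 (by omega)
          rw [ocount, if_neg hc1, if_pos rfl, this, net_cons, cnet_close]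
          have e : 1 ≤ k - 1 + net cs ↔ 1 ≤ k + (-1 + net cs) := by omega
          rw [if_congr e rfl rfl]
      · rw [if_neg hc1, if_neg hc2] at h
        obtain ⟨h1, h2⟩ := ih (j + 1) k st h
        have hc0 := cnet_of_ne hc1 hc2
        constructor
        · intro hk
          obtain ⟨ho, hn⟩ := h1 hk
          rw [ocount, if_neg hc1, if_neg hc2, ho, net_cons, hc0]
          exact ⟨rfl, by omega⟩
        · intro hk
          have := h2 hk
          rw [ocount, if_neg hc1, if_neg hc2, this, net_cons, hc0]
          have e : 1 ≤ k + net cs ↔ 1 ≤ k + (0 + net cs) := by omega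
          rw [if_congr e rfl rfl]

-- A's loop on an emit-free tail: output untouched, count raised by ocount
theorem J_none : ∀ (u : List Char) (text : List Char) (j k st : Int)
    (out : List (Int × String)) (c : Int),
    fgLoop (PySem.List.enumerate u j) k st = none →
    pnLoopA text (PySem.List.enumerate u j) st k out c = (out, c + ocount u k) := by
  intro u
  induction u with
  | nil => intro text j k st out c _; simp [PySem.List.enumerate_nil, pnLoopA, ocount]
  | cons ch cs ih =>
    intro text j k st out c h
    rw [PySem.List.enumerate_cons] at h ⊢
    rw [fgLoop] at h
    rw [pnLoopA.eq_def]
    simp only []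
    by_cases hc1 : ch = '['
    · subst hc1
      rw [if_pos rfl] at h ⊢
      by_cases hk : k = 0
      · subst hk
        rw [if_pos rfl] at h ⊢
        rw [show (0 : Int) + 1 = 1 by ring, ih text (j + 1) 1 j out (c + 1) h,
            ocount, if_pos rfl, if_pos rfl]
        exact congrArg (Prod.mk out) (by rw [show (0 : Int) + 1 = 1 by ring]; omega)
      · rw [if_neg hk] at h ⊢
        rw [ih text (j + 1) (k + 1) st out c h, ocount, if_pos rfl, if_neg hk]
        exact congrArg (Prod.mk out) (by omega)
    · by_cases hc2 : ch = ']'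
      · subst hc2
        rw [if_neg (by decide), if_pos rfl] at h ⊢
        have hk1 : ¬ k - 1 = 0 := by
          intro h0; rw [if_pos h0] at h; exact absurd h (by simp)
        rw [if_neg hk1] at h ⊢
        rw [ih text (j + 1) (k - 1) st out c h, ocount, if_neg hc1, if_pos rfl]
      · rw [if_neg hc1, if_neg hc2] at h ⊢
        rw [ih text (j + 1) k st out c h, ocount, if_neg hc1, if_neg hc2]

-- A's loop over an emit-free, open-free prefix: state advances only in the depth
theorem J_skip : ∀ (p : List Char) (text : List Char) (j k st : Int)
    (rest : List (Int × Char)) (out : List (Int × String)) (c : Int),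
    fgLoop (PySem.List.enumerate p j) k st = none →
    ocount p k = 0 →
    pnLoopA text (PySem.List.enumerate p j ++ rest) st k out c
      = pnLoopA text rest st (k + net p) out c := by
  intro p
  induction p with
  | nil => intro text j k st rest out c _ _; simp [PySem.List.enumerate_nil, net_nil]
  | cons ch cs ih =>
    intro text j k st rest out c h ho
    rw [PySem.List.enumerate_cons] at h ⊢
    rw [fgLoop] at h
    rw [ocount] at ho
    rw [List.cons_append, pnLoopA.eq_def]
    simp only []
    by_cases hc1 : ch = '['
    · subst hc1
      rw [if_pos rfl] at h ho ⊢
      by_cases hk : k = 0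
      · exfalso
        rw [if_pos hk] at ho
        have := ocount_nonneg cs (k + 1)
        omega
      · rw [if_neg hk] at h ho ⊢
        rw [show k + net ('[' :: cs) = k + 1 + net cs by rw [net_cons, cnet_open]; ring]
        exact ih text (j + 1) (k + 1) st rest out c h (by omega)
    · by_cases hc2 : ch = ']'
      · subst hc2
        rw [if_neg (by decide), if_pos rfl] at h ho ⊢
        have hk1 : ¬ k - 1 = 0 := by
          intro h0; rw [if_pos h0] at h; exact absurd h (by simp)
        rw [if_neg hk1] at h ⊢
        rw [show k + net (']' :: cs) = k - 1 + net cs by rw [net_cons, cnet_close]; ring]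
        exact ih text (j + 1) (k - 1) st rest out c h ho
      · rw [if_neg hc1, if_neg hc2] at h ho ⊢
        rw [show k + net (ch :: cs) = k + net cs by rw [net_cons, cnet_of_ne hc1 hc2]; ring]
        exact ih text (j + 1) k st rest out c h ho

-- fgLoop inside an open group agrees with the matching-close search fc
theorem fg_inner : ∀ (u : List Char) (j k st : Int), 1 ≤ k →
    fgLoop (PySem.List.enumerate u j) k st
      = (fc u (k - 1)).map (fun wv => (st, j + (wv.1.length : Int))) := by
  intro u
  induction u with
  | nil => intro j k st _; simp [PySem.List.enumerate_nil, fgLoop, fc]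
  | cons ch cs ih =>
    intro j k st hk
    rw [PySem.List.enumerate_cons, fgLoop, fc]
    by_cases hc1 : ch = '['
    · subst hc1
      rw [if_pos rfl, if_neg (by omega), if_neg (by intro hh; exact absurd hh.1 (by decide))]
      rw [ih (j + 1) (k + 1) st (by omega)]
      rw [show k + 1 - 1 = k - 1 + cnet '[' by rw [cnet_open]; ring]
      cases hfc : fc cs (k - 1 + cnet '[') with
      | none => simp
      | some wv =>
        simp only [Option.map_some, Option.some.injEq, Prod.mk.injEq, List.length_cons,
          true_and]
        push_cast
        omega
    · by_cases hc2 : ch = ']'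
      · subst hc2
        rw [if_neg (by decide), if_pos rfl]
        by_cases hk1 : k - 1 = 0
        · rw [if_pos hk1, if_pos ⟨rfl, hk1⟩]
          simp
        · rw [if_neg hk1, if_neg (by intro hh; exact hk1 hh.2)]
          rw [ih (j + 1) (k - 1) st (by omega)]
          rw [show k - 1 - 1 = k - 1 + cnet ']' by rw [cnet_close]; ring]
          cases hfc : fc cs (k - 1 + cnet ']') with
          | none => simp
          | some wv =>
            simp only [Option.map_some, Option.some.injEq, Prod.mk.injEq, List.length_cons,
              true_and]
            push_cast
            omega
      · rw [if_neg hc1, if_neg hc2, if_neg (by intro hh; exact hc2 hh.1)]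
        rw [ih (j + 1) k st hk]
        rw [show k - 1 + cnet ch = k - 1 by rw [cnet_of_ne hc1 hc2]; ring]
        cases hfc : fc cs (k - 1) with
        | none => simp
        | some wv =>
          simp only [Option.map_some, Option.some.injEq, Prod.mk.injEq, List.length_cons,
            true_and]
          push_cast
          omega

-- structure of the first complete top-level group found by fgLoop from depth k ≤ 0
theorem fg_outer : ∀ (u : List Char) (j k st s e : Int), k ≤ 0 →
    fgLoop (PySem.List.enumerate u j) k st = some (s, e) →
    ∃ p w r, u = p ++ '[' :: w ++ ']' :: r ∧
      fgLoop (PySem.List.enumerate p j) k st = none ∧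
      ocount p k = 0 ∧ k + net p = 0 ∧
      s = j + (p.length : Int) ∧ e = j + (p.length : Int) + (w.length : Int) + 1 ∧
      net w = 0 ∧ (∀ a b, w = a ++ b → 0 ≤ net a) ∧ (∀ a b, w = a ++ ']' :: b → 1 ≤ net a) := by
  intro u
  induction u with
  | nil => intro j k st s e _ h; simp [PySem.List.enumerate_nil, fgLoop] at h
  | cons c cs ih =>
    intro j k st s e hk h
    rw [PySem.List.enumerate_cons, fgLoop] at h
    by_cases hc1 : c = '['
    · subst hc1
      rw [if_pos rfl] at h
      by_cases hk0 : k = 0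
      · subst hk0
        rw [if_pos rfl, show (0 : Int) + 1 = 1 by ring] at h
        rw [fg_inner cs (j + 1) 1 j le_rfl] at h
        rw [show (1 : Int) - 1 = 0 by ring] at h
        cases hfc : fc cs 0 with
        | none => rw [hfc] at h; simp at h
        | some wv =>
          obtain ⟨w, r⟩ := wv
          rw [hfc] at h
          simp only [Option.map_some, Option.some.injEq, Prod.mk.injEq] at h
          obtain ⟨hs, he⟩ := h
          obtain ⟨hcs, hnw, hsp⟩ := fc_sound cs 0 w r le_rfl hfc
          subst hcs
          refine ⟨[], w, r, by simp, by simp [PySem.List.enumerate_nil, fgLoop], rfl, by simp [net_nil], ?_, ?_, by omega, ?_, ?_⟩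
          · simp only [List.length_nil, Nat.cast_zero]; omega
          · simp only [List.length_nil, Nat.cast_zero]; omega
          · exact prefix_nonneg (fun a b hab => by have := hsp a b hab; omega)
          · intro a b hab; have := hsp a b hab; omega
      · rw [if_neg hk0] at h
        obtain ⟨p', w, r, e1, e2, e3, e4, e5, e6, e7, e8, e9⟩ :=
          ih (j + 1) (k + 1) st s e (by omega) h
        refine ⟨'[' :: p', w, r, by simp [e1], ?_, ?_, ?_, ?_, ?_, e7, e8, e9⟩
        · rw [PySem.List.enumerate_cons, fgLoop, if_pos rfl, if_neg hk0]; exact e2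
        · rw [ocount, if_pos rfl, if_neg hk0]; omega
        · rw [net_cons, cnet_open]; omega
        · simp only [List.length_cons]; push_cast; omega
        · simp only [List.length_cons]; push_cast; omega
    · by_cases hc2 : c = ']'
      · subst hc2
        rw [if_neg (by decide), if_pos rfl, if_neg (by omega)] at h
        obtain ⟨p', w, r, e1, e2, e3, e4, e5, e6, e7, e8, e9⟩ :=
          ih (j + 1) (k - 1) st s e (by omega) h
        refine ⟨']' :: p', w, r, by simp [e1], ?_, ?_, ?_, ?_, ?_, e7, e8, e9⟩
        · rw [PySem.List.enumerate_cons, fgLoop, if_neg (by decide), if_pos rfl, if_neg (by omega)]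
          exact e2
        · rw [ocount, if_neg (by decide), if_pos rfl]; exact e3
        · rw [net_cons, cnet_close]; omega
        · simp only [List.length_cons]; push_cast; omega
        · simp only [List.length_cons]; push_cast; omega
      · rw [if_neg hc1, if_neg hc2] at h
        obtain ⟨p', w, r, e1, e2, e3, e4, e5, e6, e7, e8, e9⟩ :=
          ih (j + 1) k st s e hk h
        refine ⟨c :: p', w, r, by simp [e1], ?_, ?_, ?_, ?_, ?_, e7, e8, e9⟩
        · rw [PySem.List.enumerate_cons, fgLoop, if_neg hc1, if_neg hc2]; exact e2
        · rw [ocount, if_neg hc1, if_neg hc2]; exact e3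
        · rw [net_cons, cnet_of_ne hc1 hc2]; omega
        · simp only [List.length_cons]; push_cast; omega
        · simp only [List.length_cons]; push_cast; omega

-- A's whole computation on a string (what process_nesting does on text.toList)
def A1 (v : List Char) (c : Int) : (List (Int × String)) × Int :=
  pnLoopA v (PySem.List.enumerate v 0) (-1) 0 [] c

-- 1 if the string has an unclosed top-level group (net > 0), else 0
def adjA (v : List Char) : Int := if 0 < net v then 1 else 0

theorem A1_none (v : List Char) (c : Int)
    (h : fgLoop (PySem.List.enumerate v 0) 0 0 = none) :
    A1 v c = ([], c + adjA v) := by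
  unfold A1
  rw [J_none v v 0 0 (-1) [] c (fg_none_trans v 0 0 0 (-1) 0 h)]
  obtain ⟨_, h2⟩ := fg_none_ocount v 0 0 0 h
  rw [h2 le_rfl, adjA]
  have e : 1 ≤ 0 + net v ↔ 0 < net v := by omega
  rw [if_congr e rfl rfl]

-- the core stepping script: A's scan of d ++ (p ++ '[' :: w ++ ']' :: r) from the start of
-- the p-part, at depth 0, consumes p, the group '[w]' (numbering it and recursing on w),
-- and hands over the scan of r at depth 0
theorem Tstep (p w r : List Char)
    (hpf : fgLoop (PySem.List.enumerate p 0) 0 0 = none)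
    (hpo : ocount p 0 = 0) (hpn : net p = 0)
    (hw0 : net w = 0)
    (hwa : ∀ a b, w = a ++ b → 0 ≤ net a)
    (hwb : ∀ a b, w = a ++ ']' :: b → 1 ≤ net a)
    (d : List Char) (st : Int) (out : List (Int × String)) (c : Int) :
    pnLoopA (d ++ (p ++ '[' :: w ++ ']' :: r))
        (PySem.List.enumerate (p ++ '[' :: w ++ ']' :: r) (d.length : Int)) st 0 out c
      = pnLoopA (d ++ (p ++ '[' :: w ++ ']' :: r))
          (PySem.List.enumerate r ((d.length : Int) + (p.length : Int) + (w.length : Int) + 2))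
          ((d.length : Int) + (p.length : Int)) 0
          (out ++ ((c + 1, String.ofList ('[' :: w ++ [']'])) :: (A1 w (c + 1)).1))
          (A1 w (c + 1)).2 := by
  have hshape : p ++ '[' :: w ++ ']' :: r = p ++ '[' :: (w ++ ']' :: r) := by simp
  rw [hshape]
  rw [PySem.List.enumerate_append, PySem.List.enumerate_cons,
      PySem.List.enumerate_append, PySem.List.enumerate_cons]
  rw [J_skip p _ (d.length : Int) 0 st _ out c
      (fg_none_trans p 0 0 (d.length : Int) st 0 hpf) hpo]
  rw [show (0 : Int) + net p = 0 by omega]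
  rw [pnLoopA_open0]
  rw [skipA w 1 _ _ _ _ out (c + 1)
      (fun a b hab => by have := hwa a b hab; omega)
      (fun a b hab => by have := hwb a b hab; omega)]
  rw [show (1 : Int) + net w = 1 by omega]
  have hslw : PySem.List.slice (d ++ (p ++ '[' :: (w ++ ']' :: r)))
      (some ((d.length : Int) + (p.length : Int) + 1))
      (some ((d.length : Int) + (p.length : Int) + 1 + (w.length : Int))) = w := by
    have := sliceMid (d ++ p ++ ['[']) w (']' :: r)
      ((d.length : Int) + (p.length : Int) + 1)
      ((d.length : Int) + (p.length : Int) + 1 + (w.length : Int))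
      (by simp only [List.length_append, List.length_cons, List.length_nil]; push_cast; ring)
      (by simp only [List.length_append, List.length_cons, List.length_nil]; push_cast; ring)
    rw [show (d ++ p ++ ['[']) ++ w ++ (']' :: r) = d ++ (p ++ '[' :: (w ++ ']' :: r)) by simp] at this
    exact this
  have hguard : (PySem.List.slice (d ++ (p ++ '[' :: (w ++ ']' :: r)))
      (some ((d.length : Int) + (p.length : Int) + 1))
      (some ((d.length : Int) + (p.length : Int) + 1 + (w.length : Int)))).length
      < (d ++ (p ++ '[' :: (w ++ ']' :: r))).length := by
    rw [hslw]; simp only [List.length_append, List.length_cons]; omega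
  rw [pnLoopA_close1 _ _ _ _ out (c + 1) hguard]
  rw [hslw]
  have hslg : PySem.List.slice (d ++ (p ++ '[' :: (w ++ ']' :: r)))
      (some ((d.length : Int) + (p.length : Int)))
      (some ((d.length : Int) + (p.length : Int) + 1 + (w.length : Int) + 1)) = '[' :: w ++ [']'] := by
    have := sliceMid (d ++ p) ('[' :: w ++ [']']) r
      ((d.length : Int) + (p.length : Int))
      ((d.length : Int) + (p.length : Int) + 1 + (w.length : Int) + 1)
      (by simp only [List.length_append]; push_cast; ring)
      (by simp only [List.length_append, List.length_cons, List.length_nil]; push_cast; ring)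
    rw [show (d ++ p) ++ ('[' :: w ++ [']']) ++ r = d ++ (p ++ '[' :: (w ++ ']' :: r)) by simp] at this
    exact this
  rw [hslg]
  rw [show (d.length : Int) + (p.length : Int) + 1 + (w.length : Int) + 1
      = (d.length : Int) + (p.length : Int) + (w.length : Int) + 2 by ring]
  rfl

-- the scan of any suffix u of the text at depth 0 behaves like A run on u alone
theorem Tmain : ∀ (n : Nat) (u : List Char), u.length ≤ n →
    ∀ (d : List Char) (st : Int) (out : List (Int × String)) (c : Int),
    pnLoopA (d ++ u) (PySem.List.enumerate u (d.length : Int)) st 0 out c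
      = (out ++ (A1 u c).1, (A1 u c).2) := by
  intro n
  induction n with
  | zero =>
    intro u hlen d st out c
    have : u = [] := List.eq_nil_of_length_eq_zero (by omega)
    subst this
    simp [PySem.List.enumerate_nil, pnLoopA, A1]
  | succ n ih =>
    intro u hlen d st out c
    cases hfg : fgLoop (PySem.List.enumerate u 0) 0 0 with
    | none =>
      rw [J_none u (d ++ u) (d.length : Int) 0 st out c
          (fg_none_trans u 0 0 (d.length : Int) st 0 hfg)]
      rw [A1_none u c hfg]
      obtain ⟨_, h2⟩ := fg_none_ocount u 0 0 0 hfg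
      rw [h2 le_rfl]
      simp only [List.append_nil, adjA]
      have e : 1 ≤ 0 + net u ↔ 0 < net u := by omega
      rw [if_congr e rfl rfl]
    | some se =>
      obtain ⟨s, e⟩ := se
      obtain ⟨p, w, r, e1, e2, e3, e4, e5, e6, e7, e8, e9⟩ :=
        fg_outer u 0 0 0 s e le_rfl hfg
      subst e1
      have hpn : net p = 0 := by omega
      -- left side
      rw [Tstep p w r e2 e3 hpn e7 e8 e9 d st out c]
      have hrlen : r.length ≤ n := by
        simp only [List.length_append, List.length_cons] at hlen; omega
      have hd' : d ++ (p ++ '[' :: w ++ ']' :: r) = (d ++ p ++ '[' :: w ++ [']']) ++ r := by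
        simp
      have ho' : (d.length : Int) + (p.length : Int) + (w.length : Int) + 2
          = (((d ++ p ++ '[' :: w ++ [']']).length : Nat) : Int) := by
        simp only [List.length_append, List.length_cons, List.length_nil]
        push_cast; ring
      rw [hd', ho', ih r hrlen (d ++ p ++ '[' :: w ++ [']'])
          ((d.length : Int) + (p.length : Int)) _ _]
      -- right side
      have hA1 : A1 (p ++ '[' :: w ++ ']' :: r) c
          = (((c + 1, String.ofList ('[' :: w ++ [']'])) :: (A1 w (c + 1)).1)
              ++ (A1 r ((A1 w (c + 1)).2)).1, (A1 r ((A1 w (c + 1)).2)).2) := by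
        unfold A1
        have := Tstep p w r e2 e3 hpn e7 e8 e9 [] (-1) [] c
        simp only [List.nil_append, List.length_nil, Nat.cast_zero, Int.zero_add] at this
        rw [this]
        have hd'' : p ++ '[' :: w ++ ']' :: r = (p ++ '[' :: w ++ [']']) ++ r := by simp
        have ho'' : (p.length : Int) + (w.length : Int) + 2
            = (((p ++ '[' :: w ++ [']']).length : Nat) : Int) := by
          simp only [List.length_append, List.length_cons, List.length_nil]
          push_cast; ring
        rw [hd'', ho'', ih r hrlen (p ++ '[' :: w ++ [']']) (p.length : Int) _ _]
        simp [A1]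
      rw [hA1]
      simp [List.append_assoc]

-- A on a string whose first top-level group decomposes as p ++ '[' :: w ++ ']' :: r
theorem A1_some (p w r : List Char) (c : Int)
    (hpf : fgLoop (PySem.List.enumerate p 0) 0 0 = none)
    (hpo : ocount p 0 = 0) (hpn : net p = 0)
    (hw0 : net w = 0)
    (hwa : ∀ a b, w = a ++ b → 0 ≤ net a)
    (hwb : ∀ a b, w = a ++ ']' :: b → 1 ≤ net a) :
    A1 (p ++ '[' :: w ++ ']' :: r) c
      = (((c + 1, String.ofList ('[' :: w ++ [']'])) :: (A1 w (c + 1)).1)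
          ++ (A1 r ((A1 w (c + 1)).2)).1, (A1 r ((A1 w (c + 1)).2)).2) := by
  unfold A1
  have := Tstep p w r hpf hpo hpn hw0 hwa hwb [] (-1) [] c
  simp only [List.nil_append, List.length_nil, Nat.cast_zero, Int.zero_add] at this
  rw [this]
  have hd : p ++ '[' :: w ++ ']' :: r = (p ++ '[' :: w ++ [']']) ++ r := by simp
  have ho : (p.length : Int) + (w.length : Int) + 2
      = (((p ++ '[' :: w ++ [']']).length : Nat) : Int) := by
    simp only [List.length_append, List.length_cons, List.length_nil]
    push_cast; ring
  rw [hd, ho, Tmain r.length r le_rfl (p ++ '[' :: w ++ [']']) (p.length : Int) _ _]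
  simp [A1]

-- folding A over B's worklist, with the unclosed-group adjustment per segment
def FoldF : List (List Char) → List (Int × String) → Int → (List (Int × String)) × Int
  | [], out, c => (out, c)
  | v :: t, out, c => FoldF t (out ++ (A1 v c).1) ((A1 v c).2 - adjA v)

theorem W_lemma : ∀ (n : Nat) (todo : List (List Char)),
    (todo.map (fun s => s.length + 1)).sum ≤ n →
    ∀ (out : List (Int × String)) (c : Int),
    pnWork todo out c = FoldF todo out c := by
  intro n
  induction n with
  | zero =>
    intro todo hlen out c
    cases todo with
    | nil => simp only [pnWork, FoldF]
    | cons seg rest => simp at hlen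
  | succ n ih =>
    intro todo hlen out c
    cases todo with
    | nil => simp only [pnWork, FoldF]
    | cons seg rest =>
      simp only [List.map_cons, List.sum_cons] at hlen
      cases hfg : firstGroup seg with
      | none =>
        rw [pnWork]
        simp only [hfg]
        rw [ih rest (by omega) out c]
        rw [FoldF, A1_none seg c hfg]
        simp
      | some se =>
        obtain ⟨s, e⟩ := se
        obtain ⟨p, w, r, e1, e2, e3, e4, e5, e6, e7, e8, e9⟩ :=
          fg_outer seg 0 0 0 s e le_rfl hfg
        subst e1
        have hpn : net p = 0 := by omega
        simp only [Int.zero_add] at e5 e6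
        have hsli : PySem.List.slice (p ++ '[' :: w ++ ']' :: r) (some (s + 1)) (some e) = w := by
          have := sliceMid (p ++ ['[']) w (']' :: r) (s + 1) e
            (by simp only [List.length_append, List.length_cons, List.length_nil]; push_cast; omega)
            (by simp only [List.length_append, List.length_cons, List.length_nil]; push_cast; omega)
          rw [show (p ++ ['[']) ++ w ++ (']' :: r) = p ++ '[' :: w ++ ']' :: r by simp] at this
          exact this
        have hslt : PySem.List.slice (p ++ '[' :: w ++ ']' :: r) (some (e + 1)) none = r := by
          have he1 : e + 1 = (((p.length + w.length + 2 : Nat) : Nat) : Int) := by push_cast; omega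
          rw [he1, PySem.List.slice_from_natCast]
          rw [show p ++ '[' :: w ++ ']' :: r = (p ++ '[' :: w ++ [']']) ++ r by simp]
          rw [List.drop_left' (by simp; omega)]
        have hslg : PySem.List.slice (p ++ '[' :: w ++ ']' :: r) (some s) (some (e + 1))
            = '[' :: w ++ [']'] := by
          have := sliceMid p ('[' :: w ++ [']']) r s (e + 1)
            (by omega)
            (by simp only [List.length_cons, List.length_append, List.length_nil]; push_cast; omega)
          rw [show p ++ ('[' :: w ++ [']']) ++ r = p ++ '[' :: w ++ ']' :: r by simp] at this
          exact this
        rw [pnWork]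
        simp only [hfg, hsli, hslt, hslg]
        rw [dif_pos (by simp only [List.length_append, List.length_cons]; omega)]
        have hm : ((w :: r :: rest).map (fun s => s.length + 1)).sum ≤ n := by
          simp only [List.map_cons, List.sum_cons, List.length_append, List.length_cons] at hlen ⊢
          omega
        rw [ih _ hm]
        rw [FoldF, FoldF]
        have hadjw : adjA w = 0 := by rw [adjA, if_neg (by omega)]
        rw [hadjw]
        rw [FoldF]
        rw [A1_some p w r c e2 e3 hpn e7 e8 e9]
        have hadjseg : adjA (p ++ '[' :: w ++ ']' :: r) = adjA r := by
          rw [adjA, adjA]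
          have : net (p ++ '[' :: w ++ ']' :: r) = net r := by
            rw [net_append, net_cons, net_append, net_cons, cnet_open, cnet_close]
            omega
          rw [this]
        rw [hadjseg]
        simp [A1, List.append_assoc]

theorem net_counts (v : List Char) : net v = (v.count '[' : Int) - (v.count ']' : Int) := by
  induction v with
  | nil => simp [net_nil]
  | cons c cs ih =>
    rw [net_cons, ih]
    by_cases hc1 : c = '['
    · subst hc1; rw [cnet_open]; simp; omega
    · by_cases hc2 : c = ']'
      · subst hc2; rw [cnet_close]; simp; omega
      · rw [cnet_of_ne hc1 hc2]
        simp [hc1, hc2]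

theorem alt_eq (text : String) (count : Int) :
    process_nesting_alt text count
      = ((A1 text.toList count).1, (A1 text.toList count).2 - adjA text.toList) := by
  unfold process_nesting_alt
  rw [W_lemma ((([text.toList]).map (fun s => s.length + 1)).sum) [text.toList] le_rfl [] count]
  rw [FoldF, FoldF]
  simp

-- ===== VERDICT (by name: the statement is the Claim_ definition above) =====
theorem process_nesting_spec : Claim_equal_process_nesting := by
  intro text count _ hpre
  unfold Spec_process_nesting
  rw [alt_eq]
  have hnet : net text.toList ≤ 0 := by
    rw [net_counts]
    unfold Pre_process_nesting at hpre
    omega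
  have hadj : adjA text.toList = 0 := by rw [adjA, if_neg (by omega)]
  rw [hadj]
  show process_nesting text count = ((A1 text.toList count).1, (A1 text.toList count).2 - 0)
  rw [show (A1 text.toList count).2 - 0 = (A1 text.toList count).2 by ring]
  rfl
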